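-- pv_equiv track=rewrite | github.com/antonkulaga/haddock-antibody-docker | start.py | active_passive_to_ambig
-- ===== SOURCE A (Python) =====
-- def active_passive_to_ambig(active1: list, passive1: list, active2: list, passive2: list, segid1='A', segid2='B'):
--     """Convert active and passive residues to Ambiguous Interaction Restraints
--
--     Parameters
--     ----------
--     active1 : list
--         List of active residue numbers of the first segid
--
--     passive1 : list
--         List of passive residue numbers of the first segid
--
--     passive2 : list
--         List of passive residue numbers of the second segid
--
--     active2 : list
--         List of active residue numbers of the second segid
--
--     active2 : list
--         List of passive residue numbers of the second segid
--
--     segid1 : string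
--         Segid to use for the first model
--
--     segid2 : string
--         Segid to use for the second model
--
--     """
--
--     all1 = active1 + passive1
--     all2 = active2 + passive2
--     result = ""
--
--     for resi1 in active1:
--         result += 'assign (resi {:d} and segid {:s})\n'.format(resi1, segid1)
--         result += '(\n'
--         c = 0
--         for resi2 in all2:
--             result += '       (resi {:d} and segid {:s})\n'.format(resi2, segid2)
--             c += 1
--             if c != len(all2):
--                 result += '        or\n'
--         result += ') 2.0 2.0 0.0\n'
--
--     for resi2 in active2:
--         result += 'assign (resi {:d} and segid {:s})\n'.format(resi2, segid2)
--         result += '(\n'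
--         c = 0
--         for resi1 in all1:
--             result += '       (resi {:d} and segid {:s})\n'.format(resi1, segid1)
--             c += 1
--             if c != len(all1):
--                 result += '        or\n'
--
--         result += ') 2.0 2.0 0.0\n'
--     return result
-- ===== SOURCE B (Python) =====
-- def active_passive_to_ambig(active1: list, passive1: list, active2: list, passive2: list, segid1='A', segid2='B'):
--     """Convert active and passive residues to Ambiguous Interaction Restraints.
--
--     Same output as the original, but the inner "or"-joined block for each side
--     is built once with str.join and reused for every outer residue.
--     """
--     all1 = active1 + passive1
--     all2 = active2 + passive2
--     block1 = '        or\n'.join('       (resi {:d} and segid {:s})\n'.format(r, segid1) for r in all1)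
--     block2 = '        or\n'.join('       (resi {:d} and segid {:s})\n'.format(r, segid2) for r in all2)
--     parts = ['assign (resi {:d} and segid {:s})\n(\n'.format(r, segid1) + block2 + ') 2.0 2.0 0.0\n'
--              for r in active1]
--     parts += ['assign (resi {:d} and segid {:s})\n(\n'.format(r, segid2) + block1 + ') 2.0 2.0 0.0\n'
--               for r in active2]
--     return ''.join(parts)
-- ===== Notes on version B (the rewrite author's own statement) =====
-- stated objective: simpler
-- what changed: The counter-driven inner loop that rebuilds the same 'or'-separated residue block for every outer residue is replaced by computing each block once with str.join and concatenating per-outer-residue parts with ''.join.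
import Mathlib
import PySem

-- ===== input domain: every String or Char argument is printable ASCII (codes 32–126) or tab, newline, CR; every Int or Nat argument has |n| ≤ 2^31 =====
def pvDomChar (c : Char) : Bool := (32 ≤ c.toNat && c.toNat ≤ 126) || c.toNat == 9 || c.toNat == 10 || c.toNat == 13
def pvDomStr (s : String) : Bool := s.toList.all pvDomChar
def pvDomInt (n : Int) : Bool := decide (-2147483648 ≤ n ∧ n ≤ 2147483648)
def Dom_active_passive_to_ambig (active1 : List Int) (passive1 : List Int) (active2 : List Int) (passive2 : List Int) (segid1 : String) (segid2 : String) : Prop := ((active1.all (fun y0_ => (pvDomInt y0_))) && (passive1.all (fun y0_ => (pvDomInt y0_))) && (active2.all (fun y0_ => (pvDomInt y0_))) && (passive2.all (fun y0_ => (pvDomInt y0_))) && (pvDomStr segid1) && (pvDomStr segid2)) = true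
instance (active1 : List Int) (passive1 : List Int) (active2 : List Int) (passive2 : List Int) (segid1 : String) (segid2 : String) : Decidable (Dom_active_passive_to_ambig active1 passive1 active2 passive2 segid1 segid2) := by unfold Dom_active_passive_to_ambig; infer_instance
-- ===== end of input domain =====

-- ===== PORT A =====
-- B builds each "or"-joined residue block once with join instead of rebuilding it
-- with a counter inside the outer loop; objective: simpler.
-- helper shared by both ports: '       (resi {:d} and segid {:s})\n'.format(r, segid)
def pvLine (segid : String) (r : Int) : String :=
  "       (resi " ++ PySem.Int.toStr r ++ " and segid " ++ segid ++ ")\n"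
-- helper shared by both ports: 'assign (resi {:d} and segid {:s})\n'.format(r, segid)
def pvAssign (segid : String) (r : Int) : String :=
  "assign (resi " ++ PySem.Int.toStr r ++ " and segid " ++ segid ++ ")\n"

def active_passive_to_ambig (active1 : List Int) (passive1 : List Int) (active2 : List Int) (passive2 : List Int) (segid1 : String) (segid2 : String) : String :=
  let all1 := active1 ++ passive1
  let all2 := active2 ++ passive2
  let result := ""
  let result := active1.foldl (fun result resi1 =>
    let result := result ++ pvAssign segid1 resi1
    let result := result ++ "(\n"
    let p := all2.foldl (fun (p : String × Int) resi2 =>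
      let result := p.1 ++ pvLine segid2 resi2
      let c := p.2 + 1
      let result := if c ≠ (all2.length : Int) then result ++ "        or\n" else result
      (result, c)) (result, 0)
    p.1 ++ ") 2.0 2.0 0.0\n") result
  let result := active2.foldl (fun result resi2 =>
    let result := result ++ pvAssign segid2 resi2
    let result := result ++ "(\n"
    let p := all1.foldl (fun (p : String × Int) resi1 =>
      let result := p.1 ++ pvLine segid1 resi1
      let c := p.2 + 1
      let result := if c ≠ (all1.length : Int) then result ++ "        or\n" else result
      (result, c)) (result, 0)
    p.1 ++ ") 2.0 2.0 0.0\n") result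
  result

-- ===== PORT B =====
def active_passive_to_ambig_alt (active1 : List Int) (passive1 : List Int) (active2 : List Int) (passive2 : List Int) (segid1 : String) (segid2 : String) : String :=
  let all1 := active1 ++ passive1
  let all2 := active2 ++ passive2
  let block1 := PySem.Str.join "        or\n" (all1.map (fun r => pvLine segid1 r))
  let block2 := PySem.Str.join "        or\n" (all2.map (fun r => pvLine segid2 r))
  let parts := active1.map (fun r => pvAssign segid1 r ++ "(\n" ++ block2 ++ ") 2.0 2.0 0.0\n")
  let parts := parts ++ active2.map (fun r => pvAssign segid2 r ++ "(\n" ++ block1 ++ ") 2.0 2.0 0.0\n")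
  PySem.Str.join "" parts

-- ===== PRECONDITION & SPEC =====
def Spec_active_passive_to_ambig (active1 : List Int) (passive1 : List Int) (active2 : List Int) (passive2 : List Int) (segid1 : String) (segid2 : String) (out : String) : Prop := out = active_passive_to_ambig_alt active1 passive1 active2 passive2 segid1 segid2
instance (active1 : List Int) (passive1 : List Int) (active2 : List Int) (passive2 : List Int) (segid1 : String) (segid2 : String) (out : String) : Decidable (Spec_active_passive_to_ambig active1 passive1 active2 passive2 segid1 segid2 out) := by unfold Spec_active_passive_to_ambig; infer_instance

-- ===== CLAIM (what is proved, stated in full; the proofs are below) =====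
def Claim_equal_active_passive_to_ambig : Prop := ∀ (active1 : List Int) (passive1 : List Int) (active2 : List Int) (passive2 : List Int) (segid1 : String) (segid2 : String), Dom_active_passive_to_ambig active1 passive1 active2 passive2 segid1 segid2 → Spec_active_passive_to_ambig active1 passive1 active2 passive2 segid1 segid2 (active_passive_to_ambig active1 passive1 active2 passive2 segid1 segid2)

-- ===== LEMMAS AND PROOFS =====

lemma pvJoin_nil (sep : String) : PySem.Str.join sep [] = "" := by
  apply String.toList_injective
  simp [PySem.Str.join, PySem.Chars.join, List.intercalate]

lemma pvJoin_one (sep a : String) : PySem.Str.join sep [a] = a := by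
  apply String.toList_injective
  simp [PySem.Str.join, PySem.Chars.join, List.intercalate]

lemma pvJoin_cons_cons (sep a b : String) (t : List String) :
    PySem.Str.join sep (a :: b :: t) = a ++ sep ++ PySem.Str.join sep (b :: t) := by
  apply String.toList_injective
  simp [PySem.Str.join, PySem.Chars.join, List.intercalate]

lemma pvJoin_empty_cons (a : String) (t : List String) :
    PySem.Str.join "" (a :: t) = a ++ PySem.Str.join "" t := by
  cases t with
  | nil => simp [pvJoin_one, pvJoin_nil]
  | cons b t' => simp [pvJoin_cons_cons]

lemma pvJoin_empty_append (xs ys : List String) :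
    PySem.Str.join "" (xs ++ ys) = PySem.Str.join "" xs ++ PySem.Str.join "" ys := by
  induction xs with
  | nil => simp [pvJoin_nil]
  | cons a t ih => simp [pvJoin_empty_cons, ih, String.append_assoc]

-- the counter-driven inner loop of A equals one sep-joined block appended to the accumulator
lemma pvInner (seg : String) (n : Nat) (l : List Int) (s : String) (k : Nat)
    (h : k + l.length = n) :
    (l.foldl (fun (p : String × Int) resi =>
      let result := p.1 ++ pvLine seg resi
      let c := p.2 + 1
      let result := if c ≠ (n : Int) then result ++ "        or\n" else result
      (result, c)) (s, (k : Int))).1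
    = s ++ PySem.Str.join "        or\n" (l.map (fun r => pvLine seg r)) := by
  induction l generalizing s k with
  | nil => simp [pvJoin_nil]
  | cons r t ih =>
    cases t with
    | nil =>
      have hk : ((k : Int) + 1 ≠ (n : Int)) = False := by
        simp at h; simp; omega
      simp [List.foldl_cons, hk, pvJoin_one]
    | cons b t' =>
      have hk : ((k : Int) + 1 ≠ (n : Int)) := by simp at h; omega
      have hcast : (k : Int) + 1 = ((k + 1 : Nat) : Int) := by push_cast; ring
      have ht : (k + 1) + (b :: t').length = n := by simp at h ⊢; omega
      have hstep : (let result := (s, (k : Int)).1 ++ pvLine seg r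
          let c := (s, (k : Int)).2 + 1
          let result := if c ≠ (n : Int) then result ++ "        or\n" else result
          (result, c))
          = (s ++ pvLine seg r ++ "        or\n", ((k + 1 : Nat) : Int)) := by
        simp only []
        rw [if_pos hk, hcast]
      rw [List.foldl_cons, hstep, ih (s ++ pvLine seg r ++ "        or\n") (k + 1) ht]
      simp [pvJoin_cons_cons, String.append_assoc]

-- one outer loop of A equals the join of its per-residue parts appended to the accumulator
lemma pvOuter (segO segI : String) (all : List Int) (l : List Int) (s : String) :
    l.foldl (fun result resi1 =>
      let result := result ++ pvAssign segO resi1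
      let result := result ++ "(\n"
      let p := all.foldl (fun (p : String × Int) resi2 =>
        let result := p.1 ++ pvLine segI resi2
        let c := p.2 + 1
        let result := if c ≠ (all.length : Int) then result ++ "        or\n" else result
        (result, c)) (result, 0)
      p.1 ++ ") 2.0 2.0 0.0\n") s
    = s ++ PySem.Str.join "" (l.map (fun r =>
        pvAssign segO r ++ "(\n" ++
        PySem.Str.join "        or\n" (all.map (fun r => pvLine segI r)) ++ ") 2.0 2.0 0.0\n")) := by
  induction l generalizing s with
  | nil => simp [pvJoin_nil]
  | cons r t ih =>
    have h0 : ((0 : Nat) : Int) = (0 : Int) := rfl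
    have hin := pvInner segI all.length all ((s ++ pvAssign segO r) ++ "(\n") 0 (by simp)
    rw [h0] at hin
    simp only [List.foldl_cons]
    rw [hin, ih]
    simp [pvJoin_empty_cons, String.append_assoc]

-- ===== VERDICT (by name: the statement is the Claim_ definition above) =====
theorem active_passive_to_ambig_spec : Claim_equal_active_passive_to_ambig := by
  intro active1 passive1 active2 passive2 segid1 segid2 _
  show _ = _
  unfold active_passive_to_ambig active_passive_to_ambig_alt
  simp only []
  rw [pvOuter segid1 segid2 (active2 ++ passive2) active1 ""]
  rw [pvOuter segid2 segid1 (active1 ++ passive1) active2]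
  rw [pvJoin_empty_append]
  simp
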